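-- pv_equiv track=rewrite | github.com/mgorm34/GlossWerk | scripts/12_process_document.py | match_glossary_terms
-- ===== SOURCE A (Python) =====
-- def match_glossary_terms(source_sentence, glossary, max_terms=5):
--     """Find glossary terms in a German source sentence."""
--     if not glossary:
--         return []
--
--     source_lower = source_sentence.lower()
--     matches = []
--
--     # Sort by term length (longest first) for greedy matching
--     for key in sorted(glossary.keys(), key=len, reverse=True):
--         if key in source_lower and len(matches) < max_terms:
--             de_term, en_term = glossary[key]
--             matches.append(f"{de_term}={en_term}")
--
--     return matches
-- ===== SOURCE B (Python) =====
-- def match_glossary_terms(source_sentence, glossary, max_terms=5):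
--     """Find glossary terms in a German source sentence (substring-set lookup)."""
--     source_lower = source_sentence.lower()
--     n = len(source_lower)
--     # all substrings of source_lower whose length is the length of some glossary key
--     lengths = {len(key) for key in glossary}
--     subs = set()
--     for length in lengths:
--         for i in range(n - length + 1):
--             subs.add(source_lower[i:i + length])
--     found = [key for key in glossary if key in subs]
--     found.sort(key=len, reverse=True)
--     result = []
--     for key in found[:max(max_terms, 0)]:
--         de_term, en_term = glossary[key]
--         result.append(f"{de_term}={en_term}")
--     return result
-- ===== Notes on version B (the rewrite author's own statement) =====
-- stated objective: faster
-- what changed: Instead of sorting all glossary keys and running a substring scan of the sentence for every key, B builds a hash set of the sentence's substrings (only of lengths occurring among the keys) once, filters the keys by an O(1) set lookup, sorts only the matched keys by length (reverse, stable), and emits the first max(max_terms, 0) of them.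
import Mathlib
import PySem

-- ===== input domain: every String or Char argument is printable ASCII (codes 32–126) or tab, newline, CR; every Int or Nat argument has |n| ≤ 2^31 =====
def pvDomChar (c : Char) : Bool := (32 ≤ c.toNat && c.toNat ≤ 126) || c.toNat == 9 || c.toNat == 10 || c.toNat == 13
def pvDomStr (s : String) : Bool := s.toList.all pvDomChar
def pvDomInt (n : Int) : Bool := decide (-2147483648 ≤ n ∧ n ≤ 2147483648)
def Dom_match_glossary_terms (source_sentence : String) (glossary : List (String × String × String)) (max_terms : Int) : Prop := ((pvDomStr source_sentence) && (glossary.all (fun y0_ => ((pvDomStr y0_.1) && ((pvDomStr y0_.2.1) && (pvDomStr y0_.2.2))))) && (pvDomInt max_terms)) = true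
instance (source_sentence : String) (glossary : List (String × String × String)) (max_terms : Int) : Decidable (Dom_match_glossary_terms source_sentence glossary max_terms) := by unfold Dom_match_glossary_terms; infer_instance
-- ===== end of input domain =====

-- B replaces A's per-key substring scans over sorted keys by a hash-set of the sentence's
-- substrings (of the lengths occurring among glossary keys): filter keys first, sort only the
-- matched keys; same return value, measured faster in a timing run (objective: faster).


-- ===== PORT A =====
-- literal port of A: guard on empty dict, sort ALL keys by length (reverse, stable),
-- then one pass appending "de=en" while `key in source_lower` and len(ms) < max_terms
def match_glossary_terms (source_sentence : String) (glossary : List (String × String × String)) (max_terms : Int) : List String :=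
  if glossary = [] then []
  else
    let d := PySem.Dict.ofList (glossary.map (fun t => (t.1, t.2)))
    let source_lower := PySem.Str.lower source_sentence
    (PySem.List.sorted d.keys (fun k => PySem.Str.len k) true).foldl
      (fun ms key =>
        if PySem.Str.isIn key source_lower = true ∧ ((ms.length : Int) < max_terms) then
          ms ++ [PySem.Str.join "" [(d.getD key ("", "")).1, "=", (d.getD key ("", "")).2]]
        else ms) []

-- ===== PORT B =====
-- literal port of B (Source B): build the set of substrings of source_lower whose length is a key
-- length, filter the keys through it, sort only the ms, emit the first max(max_terms, 0)
def match_glossary_terms_alt (source_sentence : String) (glossary : List (String × String × String)) (max_terms : Int) : List String :=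
  let d := PySem.Dict.ofList (glossary.map (fun t => (t.1, t.2)))
  let source_lower := PySem.Str.lower source_sentence
  let n := PySem.Str.len source_lower
  let lengths : PySem.Set Int := PySem.Set.ofList (d.keys.map (fun k => PySem.Str.len k))
  let subs : PySem.Set String :=
    lengths.foldl (fun acc L =>
      (PySem.List.pyRange 0 (n - L + 1) 1).foldl
        (fun acc2 i => PySem.Set.add acc2 (PySem.Str.slice source_lower (some i) (some (i + L)))) acc)
      PySem.Set.empty
  let found := d.keys.filter (fun k => PySem.Set.contains subs k)
  let foundSorted := PySem.List.sorted found (fun k => PySem.Str.len k) true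
  (PySem.List.slice foundSorted none (some (max max_terms 0))).foldl
    (fun result key =>
      result ++ [PySem.Str.join "" [(d.getD key ("", "")).1, "=", (d.getD key ("", "")).2]]) []

-- ===== PRECONDITION & SPEC =====
def Spec_match_glossary_terms (source_sentence : String) (glossary : List (String × String × String)) (max_terms : Int) (out : List String) : Prop := out = match_glossary_terms_alt source_sentence glossary max_terms
instance (source_sentence : String) (glossary : List (String × String × String)) (max_terms : Int) (out : List String) : Decidable (Spec_match_glossary_terms source_sentence glossary max_terms out) := by unfold Spec_match_glossary_terms; infer_instance

-- ===== CLAIM (what is proved, stated in full; the proofs are below) =====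
def Claim_equal_match_glossary_terms : Prop := ∀ (source_sentence : String) (glossary : List (String × String × String)) (max_terms : Int), Dom_match_glossary_terms source_sentence glossary max_terms → Spec_match_glossary_terms source_sentence glossary max_terms (match_glossary_terms source_sentence glossary max_terms)

-- ===== LEMMAS AND PROOFS =====

-- A's append loop appends f k for matching keys while the count is below m
theorem pv_foldA {β : Type} (f : String → β) (m : Int) (sl : String) :
    ∀ (l : List String) (acc : List β),
      l.foldl (fun ms key =>
          if PySem.Str.isIn key sl = true ∧ ((ms.length : Int) < m) then
            ms ++ [f key]
          else ms) acc
        = acc ++ (((l.filter (fun k => PySem.Str.isIn k sl)).take (m - acc.length).toNat).map f) := by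
  intro l
  induction l with
  | nil => intro acc; simp
  | cons k l ih =>
    intro acc
    by_cases hp : PySem.Str.isIn k sl = true
    · by_cases hm : (acc.length : Int) < m
      · rw [List.foldl_cons, if_pos ⟨hp, hm⟩, ih, List.filter_cons]
        simp only [hp, if_true]
        have ht : (m - ((acc ++ [f k]).length : Int)).toNat + 1 = (m - acc.length).toNat := by
          simp; omega
        rw [← ht, List.take_succ_cons, List.map_cons, List.append_assoc, List.singleton_append]
      · rw [List.foldl_cons, if_neg (not_and.mpr fun _ => hm), ih, List.filter_cons]
        simp only [hp, if_true]
        have ht : (m - (acc.length : Int)).toNat = 0 := by omega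
        rw [ht]
        simp
    · have hp' : PySem.Str.isIn k sl = false := by revert hp; cases PySem.Str.isIn k sl <;> simp
      rw [List.foldl_cons, if_neg (not_and.mpr fun h => absurd h hp), ih, List.filter_cons]
      simp only [hp', if_false, Bool.false_eq_true]

theorem pv_filter_insertBy_neg {α : Type} (p : α → Bool) (b : α → α → Bool) (x : α)
    (hx : p x = false) :
    ∀ l : List α, (PySem.List.insertBy b x l).filter p = l.filter p := by
  intro l
  induction l with
  | nil => simp [PySem.List.insertBy, hx]
  | cons y ys ih =>
    show (if b x y then x :: y :: ys else y :: PySem.List.insertBy b x ys).filter p = _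
    by_cases hb : b x y = true
    · simp [hb, hx, List.filter_cons]
    · simp only [if_neg hb, List.filter_cons, ih]

theorem pv_insertBy_forall_before {α : Type} (b : α → α → Bool) (x : α) (l : List α)
    (h : ∀ z ∈ l, b x z = true) : PySem.List.insertBy b x l = x :: l := by
  cases l with
  | nil => rfl
  | cons y ys =>
    show (if b x y then x :: y :: ys else y :: PySem.List.insertBy b x ys) = _
    rw [if_pos (h y (List.mem_cons_self))]

theorem pv_filter_insertBy_pos {α : Type} (p : α → Bool) (b : α → α → Bool) (x : α)
    (hx : p x = true) :
    ∀ l : List α, l.Pairwise (fun y z => b x y = true → b x z = true) →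
      (PySem.List.insertBy b x l).filter p = PySem.List.insertBy b x (l.filter p) := by
  intro l
  induction l with
  | nil => intro _; simp [PySem.List.insertBy, hx]
  | cons y ys ih =>
    intro hpw
    rw [List.pairwise_cons] at hpw
    show (if b x y then x :: y :: ys else y :: PySem.List.insertBy b x ys).filter p = _
    by_cases hb : b x y = true
    · rw [if_pos hb]
      by_cases hy : p y = true
      · rw [List.filter_cons_of_pos hx, List.filter_cons_of_pos hy]
        refine (pv_insertBy_forall_before b x (y :: ys.filter p) ?_).symm
        intro z hz
        rcases List.mem_cons.mp hz with rfl | hz'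
        · exact hb
        · exact hpw.1 z (List.mem_of_mem_filter hz') hb
      · rw [List.filter_cons_of_pos hx, List.filter_cons_of_neg hy]
        refine (pv_insertBy_forall_before b x (ys.filter p) ?_).symm
        intro z hz
        exact hpw.1 z (List.mem_of_mem_filter hz) hb
    · rw [if_neg hb]
      by_cases hy : p y = true
      · rw [List.filter_cons_of_pos hy, List.filter_cons_of_pos hy]
        show _ = (if b x y then x :: y :: ys.filter p else y :: PySem.List.insertBy b x (ys.filter p))
        rw [if_neg hb, ih hpw.2]
      · rw [List.filter_cons_of_neg hy, List.filter_cons_of_neg hy, ih hpw.2]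

theorem pv_filter_sorted_rev {α : Type} (p : α → Bool) (key : α → Int) (xs : List α) :
    (PySem.List.sorted xs key true).filter p = PySem.List.sorted (xs.filter p) key true := by
  induction xs using List.reverseRecOn with
  | nil =>
    rw [show (PySem.List.sorted ([] : List α) key true) = [] from
      (PySem.List.sorted_eq_nil_iff [] key true).mpr rfl]
    rfl
  | append_singleton ys y ih =>
    rw [PySem.List.sorted_rev_eq_foldl_insertBy, List.foldl_append, List.foldl_cons,
      List.foldl_nil, ← PySem.List.sorted_rev_eq_foldl_insertBy, List.filter_append]
    by_cases hy : p y = true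
    · rw [pv_filter_insertBy_pos p _ y hy _
        ((PySem.List.sorted_pairwise_rev ys key).imp (by
          intro a b hab h
          simp only [decide_eq_true_eq] at h ⊢
          omega)), ih,
        List.filter_cons_of_pos hy, List.filter_nil,
        PySem.List.sorted_rev_eq_foldl_insertBy (ys.filter p ++ [y]) key, List.foldl_append,
        List.foldl_cons, List.foldl_nil, ← PySem.List.sorted_rev_eq_foldl_insertBy]
    · rw [pv_filter_insertBy_neg p _ y (by revert hy; cases p y <;> simp), ih,
        List.filter_cons_of_neg hy, List.filter_nil, List.append_nil]

theorem pv_mem_nestfold (sl : String) (n : Int) (ls : List Int) (init : PySem.Set String)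
    (y : String) :
    y ∈ ls.foldl (fun acc L =>
        (PySem.List.pyRange 0 (n - L + 1) 1).foldl
          (fun acc2 i => PySem.Set.add acc2 (PySem.Str.slice sl (some i) (some (i + L)))) acc)
        init
    ↔ y ∈ init ∨ ∃ L ∈ ls, ∃ i, (0 ≤ i ∧ i < n - L + 1) ∧
        y = PySem.Str.slice sl (some i) (some (i + L)) := by
  induction ls generalizing init with
  | nil => simp
  | cons L ls ih =>
    rw [List.foldl_cons, ih, PySem.Set.mem_foldl_add]
    simp only [PySem.List.mem_pyRange_one, List.mem_cons]
    constructor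
    · rintro (⟨hy | ⟨i, hi, rfl⟩⟩ | ⟨L', hL', i, hi, rfl⟩)
      · exact Or.inl hy
      · exact Or.inr ⟨L, Or.inl rfl, i, hi, rfl⟩
      · exact Or.inr ⟨L', Or.inr hL', i, hi, rfl⟩
    · rintro (hy | ⟨L', hL' | hL', i, hi, rfl⟩)
      · exact Or.inl (Or.inl hy)
      · subst hL'; exact Or.inl (Or.inr ⟨i, hi, rfl⟩)
      · exact Or.inr ⟨L', hL', i, hi, rfl⟩

theorem pv_contains_subs (sl : String) (keys : List String) (k : String) (hk : k ∈ keys) :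
    PySem.Set.contains
      ((PySem.Set.ofList (keys.map (fun k => PySem.Str.len k))).foldl (fun acc L =>
        (PySem.List.pyRange 0 (PySem.Str.len sl - L + 1) 1).foldl
          (fun acc2 i => PySem.Set.add acc2 (PySem.Str.slice sl (some i) (some (i + L)))) acc)
        PySem.Set.empty) k
      = PySem.Str.isIn k sl := by
  rw [Bool.eq_iff_iff]
  have hmem : ∀ (s : PySem.Set String), PySem.Set.contains s k = true ↔ k ∈ s := by
    intro s; simp [PySem.Set.contains]
  rw [hmem, pv_mem_nestfold, PySem.Str.isIn_iff_infix]
  constructor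
  · rintro (h0 | ⟨L, hL, i, ⟨hi0, _⟩, rfl⟩)
    · simp [PySem.Set.empty] at h0
    · have hL0 : 0 ≤ L := by
        rcases PySem.Set.mem_ofList _ _ |>.mp hL with hL'
        rcases List.mem_map.mp hL' with ⟨k', _, rfl⟩
        rw [PySem.Str.len_eq]; positivity
      rw [PySem.Str.toList_slice]
      show PySem.List.slice sl.toList (some i) (some (i + L)) <:+: sl.toList
      rw [PySem.List.slice_toNat sl.toList hi0 (by omega)]
      exact ((List.take_prefix _ _).isInfix).trans ((List.drop_suffix _ _).isInfix)
  · intro hinf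
    rcases hinf with ⟨pre, suf, hps⟩
    refine Or.inr ⟨PySem.Str.len k, (PySem.Set.mem_ofList _ _).mpr
      (List.mem_map.mpr ⟨k, hk, rfl⟩), (pre.length : Int), ⟨by positivity, ?_⟩, ?_⟩
    · have hlen : sl.toList.length = pre.length + k.toList.length + suf.length := by
        rw [← hps]; simp; omega
      rw [PySem.Str.len_eq, PySem.Str.len_eq]
      omega
    · apply String.toList_inj.mp
      rw [PySem.Str.toList_slice, PySem.Str.len_eq]
      show k.toList = PySem.List.slice sl.toList (some (pre.length : Int))
        (some ((pre.length : Int) + (k.toList.length : Int)))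
      rw [PySem.List.slice_natCast_add sl.toList pre.length k.toList.length, ← hps,
        List.append_assoc, List.drop_left, List.take_left]

theorem pv_main (sl : String) (keys : List String) (f : String → String) (m : Int) :
    (PySem.List.sorted keys (fun k => PySem.Str.len k) true).foldl
      (fun ms key =>
        if PySem.Str.isIn key sl = true ∧ ((ms.length : Int) < m) then
          ms ++ [f key]
        else ms) []
    = (PySem.List.slice
        (PySem.List.sorted
          (keys.filter (fun k => PySem.Set.contains
            ((PySem.Set.ofList (keys.map (fun k => PySem.Str.len k))).foldl (fun acc L =>
              (PySem.List.pyRange 0 (PySem.Str.len sl - L + 1) 1).foldl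
                (fun acc2 i => PySem.Set.add acc2 (PySem.Str.slice sl (some i) (some (i + L)))) acc)
              PySem.Set.empty) k))
          (fun k => PySem.Str.len k) true)
        none (some (max m 0))).foldl
      (fun result key => result ++ [f key]) [] := by
  rw [pv_foldA f m sl, PySem.List.slice_to _ (le_max_right m 0),
    PySem.List.foldl_append_singleton_eq_map,
    List.filter_congr (fun x hx => pv_contains_subs sl keys x hx),
    ← pv_filter_sorted_rev (fun k => PySem.Str.isIn k sl) (fun k => PySem.Str.len k) keys]
  have ht : (m - ((List.length ([] : List String)) : Int)).toNat = (max m 0).toNat := by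
    simp; omega
  rw [ht]

-- ===== VERDICT (by name: the statement is the Claim_ definition above) =====
theorem match_glossary_terms_spec : Claim_equal_match_glossary_terms := by
  intro source_sentence glossary max_terms _
  unfold Spec_match_glossary_terms
  by_cases hg : glossary = []
  · subst hg
    simp only [match_glossary_terms, match_glossary_terms_alt]
    rw [show (PySem.Dict.ofList (([] : List (String × String × String)).map (fun t => (t.1, t.2)))).keys = [] from rfl]
    rw [List.filter_nil, (PySem.List.sorted_eq_nil_iff _ _ _).mpr rfl,
      PySem.List.slice_to _ (le_max_right max_terms 0), List.take_nil, List.foldl_nil]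
    simp
  · have hB : match_glossary_terms_alt source_sentence glossary max_terms
        = (PySem.List.slice
            (PySem.List.sorted
              (((PySem.Dict.ofList (glossary.map (fun t => (t.1, t.2)))).keys).filter
                (fun k => PySem.Set.contains
                  ((PySem.Set.ofList (((PySem.Dict.ofList (glossary.map (fun t => (t.1, t.2)))).keys).map (fun k => PySem.Str.len k))).foldl (fun acc L =>
                    (PySem.List.pyRange 0 (PySem.Str.len (PySem.Str.lower source_sentence) - L + 1) 1).foldl
                      (fun acc2 i => PySem.Set.add acc2 (PySem.Str.slice (PySem.Str.lower source_sentence) (some i) (some (i + L)))) acc)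
                    PySem.Set.empty) k))
              (fun k => PySem.Str.len k) true)
            none (some (max max_terms 0))).foldl
          (fun result key => result ++ [PySem.Str.join "" [((PySem.Dict.ofList (glossary.map (fun t => (t.1, t.2)))).getD key ("", "")).1, "=", ((PySem.Dict.ofList (glossary.map (fun t => (t.1, t.2)))).getD key ("", "")).2]]) [] := rfl
    have hA : match_glossary_terms source_sentence glossary max_terms
        = (PySem.List.sorted ((PySem.Dict.ofList (glossary.map (fun t => (t.1, t.2)))).keys) (fun k => PySem.Str.len k) true).foldl
            (fun ms key =>
              if PySem.Str.isIn key (PySem.Str.lower source_sentence) = true ∧ ((ms.length : Int) < max_terms) then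
                ms ++ [PySem.Str.join "" [((PySem.Dict.ofList (glossary.map (fun t => (t.1, t.2)))).getD key ("", "")).1, "=", ((PySem.Dict.ofList (glossary.map (fun t => (t.1, t.2)))).getD key ("", "")).2]]
              else ms) [] := by
      unfold match_glossary_terms
      split
      next h => exact absurd h hg
      next => rfl
    rw [hA, hB]
    generalize PySem.Dict.ofList (glossary.map (fun t => (t.1, t.2))) = d
    generalize PySem.Str.lower source_sentence = sl
    exact pv_main sl d.keys
      (fun key => PySem.Str.join "" [(d.getD key ("", "")).1, "=", (d.getD key ("", "")).2])
      max_terms
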